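-- pv_equiv track=rewrite | github.com/lishengbao/compass-metrics-model-1 | compass_common/utils/list_utils.py | list_sub
-- ===== SOURCE A (Python) =====
-- def list_sub(list_value, start_value, end_value, start_include=True, end_include=False):
--     """ Returns the value in the range of start_value and end_value """
--     if start_include and end_include:
--         return [x for x in sorted(list_value) if start_value <= x <= end_value]
--     elif start_include and not end_include:
--         return [x for x in sorted(list_value) if start_value <= x < end_value]
--     elif not start_include and end_include:
--         return [x for x in sorted(list_value) if start_value < x <= end_value]
--     elif not start_include and not end_include:
--         return [x for x in sorted(list_value) if start_value < x < end_value]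
-- ===== SOURCE B (Python) =====
-- def list_sub(list_value, start_value, end_value, start_include=True, end_include=False):
--     """Sort once, skip the prefix below the start bound, then collect until the
--     end bound fails (early exit) -- instead of testing every element."""
--     s = sorted(list_value)
--     n = len(s)
--     i = 0
--     while i < n and (s[i] < start_value if start_include else s[i] <= start_value):
--         i += 1
--     out = []
--     while i < n and (s[i] <= end_value if end_include else s[i] < end_value):
--         out.append(s[i])
--         i += 1
--     return out
-- ===== Notes on version B (the rewrite author's own statement) =====
-- stated objective: alternative
-- what changed: Replaces A's four branch-specific full-list filter comprehensions with a single sort followed by a two-phase scan: skip the sorted prefix below the start bound, then collect elements while the end bound holds and stop early.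
import Mathlib
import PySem

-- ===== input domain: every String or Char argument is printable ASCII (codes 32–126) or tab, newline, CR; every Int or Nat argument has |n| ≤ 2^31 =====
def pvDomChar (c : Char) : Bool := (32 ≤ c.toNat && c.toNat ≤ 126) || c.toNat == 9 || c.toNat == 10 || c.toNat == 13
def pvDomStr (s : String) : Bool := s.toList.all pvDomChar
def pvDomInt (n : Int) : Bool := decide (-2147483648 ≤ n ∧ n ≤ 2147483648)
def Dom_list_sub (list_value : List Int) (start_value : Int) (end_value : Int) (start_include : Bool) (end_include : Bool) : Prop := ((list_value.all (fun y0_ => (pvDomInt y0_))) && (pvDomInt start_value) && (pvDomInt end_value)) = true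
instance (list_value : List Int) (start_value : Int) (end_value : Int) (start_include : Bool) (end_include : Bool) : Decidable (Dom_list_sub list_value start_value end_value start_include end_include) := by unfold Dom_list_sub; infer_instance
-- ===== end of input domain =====

-- B sorts once, then skips the prefix below the start bound and collects until the end bound
-- fails (early exit), instead of A's four branch-specific full-list filter comprehensions.


-- ===== PORT A =====
def list_sub (list_value : List Int) (start_value : Int) (end_value : Int) (start_include : Bool) (end_include : Bool) : List Int :=
  if start_include && end_include then
    (PySem.List.sorted list_value (fun x => x) false).filter (fun x => decide (start_value ≤ x ∧ x ≤ end_value))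
  else if start_include && !end_include then
    (PySem.List.sorted list_value (fun x => x) false).filter (fun x => decide (start_value ≤ x ∧ x < end_value))
  else if !start_include && end_include then
    (PySem.List.sorted list_value (fun x => x) false).filter (fun x => decide (start_value < x ∧ x ≤ end_value))
  else
    (PySem.List.sorted list_value (fun x => x) false).filter (fun x => decide (start_value < x ∧ x < end_value))

-- ===== PORT B =====
-- first while loop of Source B: advance past elements below the start bound (recursion on the suffix)
def pvSkipBelow (start_value : Int) (start_include : Bool) : List Int → List Int
  | [] => []
  | x :: rest =>
    if (if start_include then decide (x < start_value) else decide (x ≤ start_value)) then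
      pvSkipBelow start_value start_include rest
    else x :: rest

-- second while loop of Source B: collect while the end bound holds, stop at the first failure
def pvCollectWithin (end_value : Int) (end_include : Bool) : List Int → List Int
  | [] => []
  | x :: rest =>
    if (if end_include then decide (x ≤ end_value) else decide (x < end_value)) then
      x :: pvCollectWithin end_value end_include rest
    else []

def list_sub_alt (list_value : List Int) (start_value : Int) (end_value : Int) (start_include : Bool) (end_include : Bool) : List Int :=
  pvCollectWithin end_value end_include
    (pvSkipBelow start_value start_include (PySem.List.sorted list_value (fun x => x) false))

-- ===== PRECONDITION & SPEC =====
def Spec_list_sub (list_value : List Int) (start_value : Int) (end_value : Int) (start_include : Bool) (end_include : Bool) (out : List Int) : Prop := out = list_sub_alt list_value start_value end_value start_include end_include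
instance (list_value : List Int) (start_value : Int) (end_value : Int) (start_include : Bool) (end_include : Bool) (out : List Int) : Decidable (Spec_list_sub list_value start_value end_value start_include end_include out) := by unfold Spec_list_sub; infer_instance

-- ===== CLAIM (what is proved, stated in full; the proofs are below) =====
def Claim_equal_list_sub : Prop := ∀ (list_value : List Int) (start_value : Int) (end_value : Int) (start_include : Bool) (end_include : Bool), Dom_list_sub list_value start_value end_value start_include end_include → Spec_list_sub list_value start_value end_value start_include end_include (list_sub list_value start_value end_value start_include end_include)

-- ===== LEMMAS AND PROOFS =====

-- the lower-bound test, as B's loops see it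
def pvLow (start_value : Int) (start_include : Bool) (x : Int) : Bool :=
  if start_include then decide (start_value ≤ x) else decide (start_value < x)

def pvHigh (end_value : Int) (end_include : Bool) (x : Int) : Bool :=
  if end_include then decide (x ≤ end_value) else decide (x < end_value)

theorem skip_cond (sv : Int) (si : Bool) (x : Int) :
    (if si then decide (x < sv) else decide (x ≤ sv)) = !pvLow sv si x := by
  cases si <;>
    simp only [pvLow, Bool.false_eq_true, if_true, if_false, ← decide_not] <;>
    exact decide_eq_decide.mpr (by omega)

theorem take_cond (ev : Int) (ei : Bool) (x : Int) :
    (if ei then decide (x ≤ ev) else decide (x < ev)) = pvHigh ev ei x := by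
  cases ei <;> simp [pvHigh]

theorem pvLow_mono {sv : Int} {si : Bool} {x y : Int} (h : pvLow sv si x = true) (hxy : x ≤ y) :
    pvLow sv si y = true := by
  cases si <;> simp [pvLow] at * <;> omega

theorem pvHigh_anti {ev : Int} {ei : Bool} {x y : Int} (h : pvHigh ev ei x = false) (hxy : x ≤ y) :
    pvHigh ev ei y = false := by
  cases ei <;> simp [pvHigh] at * <;> omega

-- on a sorted list whose elements all pass the lower bound, the filter is the collect loop
theorem filter_eq_collect (sv ev : Int) (si ei : Bool) (s : List Int)
    (hp : s.Pairwise (· ≤ ·)) (hall : ∀ y ∈ s, pvLow sv si y = true) :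
    s.filter (fun x => pvLow sv si x && pvHigh ev ei x) = pvCollectWithin ev ei s := by
  induction s with
  | nil => rfl
  | cons x rest ih =>
    rcases List.pairwise_cons.mp hp with ⟨hx, hrest⟩
    have hlx : pvLow sv si x = true := hall x (List.mem_cons_self)
    by_cases hh : pvHigh ev ei x = true
    · have hrec := ih hrest (fun y hy => hall y (List.mem_cons_of_mem _ hy))
      have e1 : pvCollectWithin ev ei (x :: rest) = x :: pvCollectWithin ev ei rest := by
        simp only [pvCollectWithin, take_cond, hh, if_true]
      rw [e1, List.filter_cons]
      simp [hlx, hh, hrec]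
    · have hh' : pvHigh ev ei x = false := by revert hh; cases (pvHigh ev ei x) <;> simp
      have hrestf : rest.filter (fun y => pvLow sv si y && pvHigh ev ei y) = [] := by
        apply List.filter_eq_nil_iff.mpr
        intro y hy
        have := pvHigh_anti hh' (hx y hy)
        simp [this]
      have e1 : pvCollectWithin ev ei (x :: rest) = [] := by
        simp only [pvCollectWithin, take_cond, hh']
        simp
      rw [e1, List.filter_cons]
      simp [hh', hrestf]

theorem filter_eq_scan (sv ev : Int) (si ei : Bool) (s : List Int)
    (hp : s.Pairwise (· ≤ ·)) :
    s.filter (fun x => pvLow sv si x && pvHigh ev ei x)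
      = pvCollectWithin ev ei (pvSkipBelow sv si s) := by
  induction s with
  | nil => rfl
  | cons x rest ih =>
    rcases List.pairwise_cons.mp hp with ⟨hx, hrest⟩
    by_cases hl : pvLow sv si x = true
    · have hskip : pvSkipBelow sv si (x :: rest) = x :: rest := by
        simp only [pvSkipBelow, skip_cond, hl]
        simp
      rw [hskip]
      exact filter_eq_collect sv ev si ei (x :: rest) hp
        (fun y hy => by
          rcases List.mem_cons.mp hy with rfl | hy
          · exact hl
          · exact pvLow_mono hl (hx y hy))
    · have hl' : pvLow sv si x = false := by revert hl; cases (pvLow sv si x) <;> simp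
      have hskip : pvSkipBelow sv si (x :: rest) = pvSkipBelow sv si rest := by
        simp only [pvSkipBelow, skip_cond, hl']
        simp
      rw [hskip, ← ih hrest]
      simp [hl']

-- ===== VERDICT (by name: the statement is the Claim_ definition above) =====
theorem list_sub_spec : Claim_equal_list_sub := by
  intro lv sv ev si ei _
  unfold Spec_list_sub list_sub list_sub_alt
  have hp : (PySem.List.sorted lv (fun x => x) false).Pairwise (· ≤ ·) := by
    simpa using PySem.List.sorted_pairwise lv (fun x => x)
  have h := filter_eq_scan sv ev si ei _ hp
  cases si <;> cases ei <;>
    simpa [pvLow, pvHigh, Bool.decide_and] using h
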